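-- pv_equiv track=rewrite | github.com/mpurowitz/hockey-stats-scraper | enhanced_scraper_2025-2026.py | parse_age
-- ===== SOURCE A (Python) =====
-- def parse_age(age_text):
--     """Extract age from text - SIMPLE STRING METHOD"""
--     try:
--         if not age_text:
--             return 0
--         numbers = ''.join(c for c in str(age_text) if c.isdigit())
--         return int(numbers) if numbers else 0
--     except:
--         return 0
-- ===== SOURCE B (Python) =====
-- def parse_age(age_text):
--     """Extract age from text - single-pass numeric accumulator"""
--     try:
--         if not age_text:
--             return 0
--         result = 0
--         found = False
--         for c in str(age_text):
--             if c.isdigit():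
--                 result = result * 10 + int(c)
--                 found = True
--         return result if found else 0
--     except:
--         return 0
-- ===== Notes on version B (the rewrite author's own statement) =====
-- stated objective: alternative
-- what changed: Instead of joining the digit characters into an intermediate string and calling int() on it, B accumulates the value numerically in one pass (result = result*10 + int(c)) with a found flag, keeping the same falsy guard and blanket try/except.
import Mathlib
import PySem

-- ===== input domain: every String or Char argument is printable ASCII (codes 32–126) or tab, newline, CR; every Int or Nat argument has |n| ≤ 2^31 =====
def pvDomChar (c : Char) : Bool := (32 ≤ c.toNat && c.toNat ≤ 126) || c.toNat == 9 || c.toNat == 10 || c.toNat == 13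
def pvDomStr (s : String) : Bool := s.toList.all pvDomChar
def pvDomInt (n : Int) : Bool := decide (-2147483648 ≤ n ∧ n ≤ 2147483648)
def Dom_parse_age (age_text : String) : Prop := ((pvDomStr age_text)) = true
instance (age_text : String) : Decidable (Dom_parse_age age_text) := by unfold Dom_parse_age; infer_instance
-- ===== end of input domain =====

-- B replaces A's join-digits-then-int() string round-trip with a single-pass numeric
-- accumulator (result*10 + digit) and a found flag; same return values.


-- ===== PORT A =====
-- int(numbers) hand-ported for the one shape A reaches: 'numbers' is a nonempty string
-- of characters kept by isdigit, i.e. exactly '0'..'9' (PySem.Chars.isdigit is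
-- '0' ≤ c ≤ '9'), where int() is the plain base-10 digit fold and never raises.
-- (PySem.Int.ofChars? covers int() in general but its digit reader is private, so it
-- admits no proof on a non-literal digit string; this hand port is exact here.)
def pvIntOfDigits (ds : List Char) : Nat :=
  ds.foldl (fun a c => a * 10 + (c.toNat - 48)) 0

-- A: guard on falsy input, join the digit characters, int() the digit string;
-- the blanket 'except: return 0' is unreachable on the admitted inputs.
def parse_age (age_text : String) : Int :=
  if age_text = "" then 0
  else
    let numbers := age_text.toList.filter PySem.Chars.isdigit
    if numbers ≠ [] then (pvIntOfDigits numbers : Int) else 0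

-- ===== PORT B =====
-- B: one left fold over the characters carrying (result, found); int(c) on an ASCII
-- digit character is c.toNat - 48 (exact here: isdigit admits only '0'..'9').
def parse_age_alt (age_text : String) : Int :=
  if age_text = "" then 0
  else
    let st := age_text.toList.foldl
      (fun (p : Int × Bool) c =>
        if PySem.Chars.isdigit c then (p.1 * 10 + ((c.toNat : Int) - 48), true) else p)
      (0, false)
    if st.2 then st.1 else 0

-- ===== PRECONDITION & SPEC =====
def Spec_parse_age (age_text : String) (out : Int) : Prop := out = parse_age_alt age_text
instance (age_text : String) (out : Int) : Decidable (Spec_parse_age age_text out) := by unfold Spec_parse_age; infer_instance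

-- ===== CLAIM (what is proved, stated in full; the proofs are below) =====
def Claim_equal_parse_age : Prop := ∀ (age_text : String), Dom_parse_age age_text → Spec_parse_age age_text (parse_age age_text)

-- ===== LEMMAS AND PROOFS =====

-- a character kept by isdigit has code 48..57
theorem isdigit_toNat {c : Char} (h : PySem.Chars.isdigit c = true) :
    48 ≤ c.toNat ∧ c.toNat ≤ 57 := by
  simp only [PySem.Chars.isdigit, Bool.and_eq_true, decide_eq_true_eq, Char.le_def] at h
  exact ⟨h.1, h.2⟩

-- B's fold leaves the state unchanged on non-digits, so it equals the fold
-- over the filtered list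
theorem foldB_filter (cs : List Char) (p : Int × Bool) :
    cs.foldl
      (fun (p : Int × Bool) c =>
        if PySem.Chars.isdigit c then (p.1 * 10 + ((c.toNat : Int) - 48), true) else p) p
    = (cs.filter PySem.Chars.isdigit).foldl
      (fun (p : Int × Bool) c =>
        if PySem.Chars.isdigit c then (p.1 * 10 + ((c.toNat : Int) - 48), true) else p) p := by
  induction cs generalizing p with
  | nil => rfl
  | cons c t ih =>
    by_cases h : PySem.Chars.isdigit c = true
    · simp [h, ih]
    · simp only [Bool.not_eq_true] at h
      simp [h, ih]

-- on an all-digit list B's fold is the plain value fold with the flag pinned true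
theorem foldB_digits (ds : List Char) (hds : ∀ c ∈ ds, PySem.Chars.isdigit c = true)
    (r : Int) :
    ds.foldl
      (fun (p : Int × Bool) c =>
        if PySem.Chars.isdigit c then (p.1 * 10 + ((c.toNat : Int) - 48), true) else p) (r, true)
    = (ds.foldl (fun (a : Int) c => a * 10 + ((c.toNat : Int) - 48)) r, true) := by
  induction ds generalizing r with
  | nil => rfl
  | cons c t ih =>
    simp only [List.foldl_cons, hds c (by simp)]
    exact ih (fun x hx => hds x (by simp [hx])) _

-- the Nat-valued digit fold casts to the Int-valued one
theorem foldNat_int (ds : List Char) (hds : ∀ c ∈ ds, PySem.Chars.isdigit c = true)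
    (a : Nat) :
    ((ds.foldl (fun a c => a * 10 + (c.toNat - 48)) a : Nat) : Int)
    = ds.foldl (fun (a : Int) c => a * 10 + ((c.toNat : Int) - 48)) (a : Int) := by
  induction ds generalizing a with
  | nil => rfl
  | cons c t ih =>
    have h48 := (isdigit_toNat (hds c (by simp))).1
    simp only [List.foldl_cons]
    rw [ih (fun x hx => hds x (by simp [hx]))]
    congr 1
    push_cast [Nat.cast_sub h48]
    ring

-- ===== VERDICT (by name: the statement is the Claim_ definition above) =====
theorem parse_age_spec : Claim_equal_parse_age := by
  intro s _
  unfold Spec_parse_age parse_age parse_age_alt pvIntOfDigits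
  by_cases hs : s = ""
  · simp [hs]
  · simp only [hs, ite_false]
    rw [foldB_filter]
    cases hnum : s.toList.filter PySem.Chars.isdigit with
    | nil => simp
    | cons d t =>
      have hds : ∀ c ∈ d :: t, PySem.Chars.isdigit c = true := by
        intro c hc
        exact (List.mem_filter.mp (hnum ▸ hc)).2
      simp only [List.foldl_cons, hds d (by simp), ne_eq, reduceCtorEq,
        not_false_eq_true, ite_true]
      rw [foldB_digits t (fun x hx => hds x (by simp [hx])), if_pos rfl]
      rw [foldNat_int t (fun x hx => hds x (by simp [hx]))]
      have h48 := (isdigit_toNat (hds d (by simp))).1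
      congr 1
      push_cast [Nat.cast_sub h48]
      ring
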